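-- pv_equiv track=rewrite | github.com/Kriegspiel/bot-gpt-nano | bot.py | fallback_decision
-- ===== SOURCE A (Python) =====
-- from typing import Any
--
-- def fallback_decision(state: dict[str, Any]) -> dict[str, Any] | None:
--     allowed_moves = state.get("allowed_moves") if isinstance(state.get("allowed_moves"), list) else []
--     possible_actions = state.get("possible_actions") if isinstance(state.get("possible_actions"), list) else []
--
--     if allowed_moves:
--         ordered = sorted(allowed_moves)
--         center_bias = ["d2d4", "e2e4", "d7d5", "e7e5"]
--         for preferred in center_bias:
--             if preferred in ordered:
--                 return {"action": "move", "uci": preferred}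
--         return {"action": "move", "uci": ordered[0]}
--     if "ask_any" in possible_actions:
--         return {"action": "ask_any", "uci": None}
--     return None
-- ===== SOURCE B (Python) =====
-- from typing import Any
--
-- def _rank(m: str) -> int:
--     if m == "d2d4":
--         return 0
--     if m == "e2e4":
--         return 1
--     if m == "d7d5":
--         return 2
--     if m == "e7e5":
--         return 3
--     return 4
--
-- def _best(best: str, rest: list) -> str:
--     for m in rest:
--         if (_rank(m), m) < (_rank(best), best):
--             best = m
--     return best
--
-- def fallback_decision(state: dict[str, Any]) -> dict[str, Any] | None:
--     allowed_moves = state.get("allowed_moves") if isinstance(state.get("allowed_moves"), list) else []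
--     possible_actions = state.get("possible_actions") if isinstance(state.get("possible_actions"), list) else []
--
--     if allowed_moves:
--         return {"action": "move", "uci": _best(allowed_moves[0], allowed_moves[1:])}
--     if "ask_any" in possible_actions:
--         return {"action": "ask_any", "uci": None}
--     return None
-- ===== Notes on version B (the rewrite author's own statement) =====
-- stated objective: simpler
-- what changed: Replaces A's sort of allowed_moves plus a membership scan over the four center moves with a rank function and one running-minimum pass over allowed_moves under the key (rank, move), eliminating the sort and the preference loop.
import Mathlib
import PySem

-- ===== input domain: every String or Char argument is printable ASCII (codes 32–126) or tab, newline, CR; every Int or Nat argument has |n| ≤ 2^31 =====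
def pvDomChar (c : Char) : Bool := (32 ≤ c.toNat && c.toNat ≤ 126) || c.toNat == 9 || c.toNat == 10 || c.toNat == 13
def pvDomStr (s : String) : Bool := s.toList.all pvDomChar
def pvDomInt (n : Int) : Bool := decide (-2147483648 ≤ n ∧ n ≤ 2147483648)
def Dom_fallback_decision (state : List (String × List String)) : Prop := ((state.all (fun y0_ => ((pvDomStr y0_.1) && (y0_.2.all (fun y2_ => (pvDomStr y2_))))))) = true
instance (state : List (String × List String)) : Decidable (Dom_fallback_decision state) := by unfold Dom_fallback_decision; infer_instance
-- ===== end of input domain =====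

-- B replaces A's sort-then-preference-scan by a rank function and one running-minimum pass (same result, no sort).

-- ===== PORT A =====
-- state.get(k) if isinstance(…, list) else []  — in this typed model every present value is a list,
-- and a missing key yields None (not a list), so this is exactly Dict.getD with default [].
def fallback_decision (state : List (String × List String)) : Option (List (String × Option String)) :=
  let allowed_moves := PySem.Dict.getD (PySem.Dict.mk state) "allowed_moves" []
  let possible_actions := PySem.Dict.getD (PySem.Dict.mk state) "possible_actions" []
  if allowed_moves ≠ [] then
    let ordered := PySem.List.sorted allowed_moves (fun x => x) false
    let center_bias : List String := ["d2d4", "e2e4", "d7d5", "e7e5"]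
    -- 'for preferred in center_bias: if preferred in ordered: return …'
    match center_bias.find? (fun preferred => ordered.contains preferred) with
    | some preferred => some [("action", some "move"), ("uci", some preferred)]
    | none =>
      -- ordered[0]; ordered ≠ [] here, so pyGet? is some
      match PySem.List.pyGet? ordered 0 with
      | some first => some [("action", some "move"), ("uci", some first)]
      | none => none
  else if possible_actions.contains "ask_any" then
    some [("action", some "ask_any"), ("uci", none)]
  else
    none

-- ===== PORT B =====
-- _rank: the if-chain assigning each center move its preference rank (4 = not a center move)
def pvBRank (m : String) : Int :=
  if m = "d2d4" then 0
  else if m = "e2e4" then 1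
  else if m = "d7d5" then 2
  else if m = "e7e5" then 3
  else 4

-- _best: running minimum over the remaining moves; the Python tuple comparison
-- (_rank(m), m) < (_rank(best), best) is written out lexicographically
def pvBBest (best : String) (rest : List String) : String :=
  rest.foldl
    (fun best m =>
      if pvBRank m < pvBRank best ∨ (pvBRank m = pvBRank best ∧ m < best) then m else best)
    best

def fallback_decision_alt (state : List (String × List String)) : Option (List (String × Option String)) :=
  let allowed_moves := PySem.Dict.getD (PySem.Dict.mk state) "allowed_moves" []
  let possible_actions := PySem.Dict.getD (PySem.Dict.mk state) "possible_actions" []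
  match allowed_moves with
  | first :: rest => some [("action", some "move"), ("uci", some (pvBBest first rest))]
  | [] =>
    if possible_actions.contains "ask_any" then
      some [("action", some "ask_any"), ("uci", none)]
    else
      none

-- ===== PRECONDITION & SPEC =====
def Spec_fallback_decision (state : List (String × List String)) (out : Option (List (String × Option String))) : Prop := out = fallback_decision_alt state
instance (state : List (String × List String)) (out : Option (List (String × Option String))) : Decidable (Spec_fallback_decision state out) := by unfold Spec_fallback_decision; infer_instance

-- ===== CLAIM (what is proved, stated in full; the proofs are below) =====
def Claim_equal_fallback_decision : Prop := ∀ (state : List (String × List String)), Dom_fallback_decision state → Spec_fallback_decision state (fallback_decision state)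

-- ===== LEMMAS AND PROOFS =====

theorem pvBRank_nonneg (m : String) : 0 ≤ pvBRank m := by
  unfold pvBRank; split_ifs <;> norm_num

-- pvBBest returns an element of best::rest minimal for the lexicographic key (pvBRank, id)
theorem pvBBest_spec (t : List String) : ∀ (a : String),
    (pvBBest a t = a ∨ pvBBest a t ∈ t) ∧
    ∀ y, (y = a ∨ y ∈ t) →
      toLex (pvBRank (pvBBest a t), pvBBest a t) ≤ toLex (pvBRank y, y) := by
  induction t with
  | nil =>
    intro a
    refine ⟨Or.inl rfl, ?_⟩
    rintro y (rfl | h)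
    · simp [pvBBest]
    · cases h
  | cons x t ih =>
    intro a
    have hstep : pvBBest a (x :: t) =
        pvBBest (if pvBRank x < pvBRank a ∨ (pvBRank x = pvBRank a ∧ x < a) then x else a) t := by
      simp [pvBBest, List.foldl_cons]
    by_cases hc : pvBRank x < pvBRank a ∨ (pvBRank x = pvBRank a ∧ x < a)
    · rw [if_pos hc] at hstep
      obtain ⟨hmem, hmin⟩ := ih x
      rw [hstep]
      constructor
      · rcases hmem with h | h
        · exact Or.inr (by rw [h]; exact List.mem_cons_self ..)
        · exact Or.inr (List.mem_cons_of_mem _ h)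
      · rintro y (rfl | hy)
        · have hxy : toLex (pvBRank x, x) < toLex (pvBRank y, y) := by
            rcases hc with h | ⟨he, hl⟩
            · exact Prod.Lex.lt_iff.mpr (Or.inl h)
            · exact Prod.Lex.lt_iff.mpr (Or.inr ⟨he, hl⟩)
          exact le_trans (hmin x (Or.inl rfl)) (le_of_lt hxy)
        · rcases List.mem_cons.mp hy with rfl | hy
          · exact hmin y (Or.inl rfl)
          · exact hmin y (Or.inr hy)
    · rw [if_neg hc] at hstep
      obtain ⟨hmem, hmin⟩ := ih a
      rw [hstep]
      constructor
      · rcases hmem with h | h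
        · exact Or.inl h
        · exact Or.inr (List.mem_cons_of_mem _ h)
      · rintro y (rfl | hy)
        · exact hmin y (Or.inl rfl)
        · rcases List.mem_cons.mp hy with rfl | hy
          · -- ¬ key y < key a, so key a ≤ key y, and min ≤ key a
            have hya : toLex (pvBRank a, a) ≤ toLex (pvBRank y, y) := by
              by_contra hno
              rcases Prod.Lex.lt_iff.mp (not_le.mp hno) with h1 | ⟨h1, h2⟩
              · exact hc (Or.inl h1)
              · exact hc (Or.inr ⟨h1, h2⟩)
            exact le_trans (hmin a (Or.inl rfl)) hya
          · exact hmin y (Or.inr hy)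

-- sorted l contains exactly l's elements
theorem pvMem_sorted (l : List String) (x : String) :
    x ∈ PySem.List.sorted l (fun y => y) false ↔ x ∈ l :=
  (PySem.List.sorted_perm l (fun y => y) false).mem_iff

-- the head of sorted l is a minimum of l
theorem pvSorted_head_min (l : List String) (hl : l ≠ []) :
    ∃ h0, PySem.List.pyGet? (PySem.List.sorted l (fun y => y) false) 0 = some h0 ∧
      h0 ∈ l ∧ ∀ y ∈ l, h0 ≤ y := by
  have hne : PySem.List.sorted l (fun y => y) false ≠ [] := by
    simpa [PySem.List.sorted_eq_nil_iff] using hl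
  set s := PySem.List.sorted l (fun y => y) false with hs
  have hlen : 0 < s.length := List.length_pos_iff.mpr hne
  refine ⟨s[0], ?_, ?_, ?_⟩
  · simp [PySem.List.pyGet?, PySem.List.pyIdx?, hlen]
  · exact (pvMem_sorted l _).mp (List.getElem_mem hlen)
  · intro y hy
    obtain ⟨j, hj, hjy⟩ := List.getElem_of_mem ((pvMem_sorted l y).mpr hy)
    exact hjy ▸ PySem.List.sorted_id_getElem_mono l (Nat.zero_le j) hj

-- pvBRank takes value k < 4 only at the k-th center move
theorem pvBRank_eq_zero (m : String) (h : pvBRank m = 0) : m = "d2d4" := by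
  unfold pvBRank at h; split_ifs at h with a b c d <;> first | exact a | omega

theorem pvBRank_eq_one (m : String) (h : pvBRank m = 1) : m = "e2e4" := by
  unfold pvBRank at h; split_ifs at h with a b c d <;> first | exact b | omega

theorem pvBRank_eq_two (m : String) (h : pvBRank m = 2) : m = "d7d5" := by
  unfold pvBRank at h; split_ifs at h with a b c d <;> first | exact c | omega

theorem pvBRank_eq_three (m : String) (h : pvBRank m = 3) : m = "e7e5" := by
  unfold pvBRank at h; split_ifs at h with a b c d <;> first | exact d | omega

-- the main branch equality: for l = a :: t, A's preference scan / sorted head equals B's running minimum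
theorem pvBranch_eq (a : String) (t : List String) :
    (match (["d2d4", "e2e4", "d7d5", "e7e5"] : List String).find?
        (fun p => (PySem.List.sorted (a :: t) (fun x => x) false).contains p) with
     | some preferred => some [("action", some "move"), ("uci", some preferred)]
     | none =>
        match PySem.List.pyGet? (PySem.List.sorted (a :: t) (fun x => x) false) 0 with
        | some first => some [("action", some "move"), ("uci", some first)]
        | none => (none : Option (List (String × Option String)))) =
    some [("action", some "move"), ("uci", some (pvBBest a t))] := by
  set l := a :: t with hlv
  have hl : l ≠ [] := by simp [hlv]
  obtain ⟨hmem', hmin'⟩ := pvBBest_spec t a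
  set m := pvBBest a t with hmv
  have hmem : m ∈ l := by
    rcases hmem' with h | h
    · exact h ▸ List.mem_cons_self ..
    · exact List.mem_cons_of_mem _ h
  have hmin : ∀ y ∈ l, pvBRank m < pvBRank y ∨ (pvBRank m = pvBRank y ∧ m ≤ y) := by
    intro y hy
    have hle : toLex (pvBRank m, m) ≤ toLex (pvBRank y, y) := by
      rcases List.mem_cons.mp hy with rfl | hy
      · exact hmin' y (Or.inl rfl)
      · exact hmin' y (Or.inr hy)
    simpa [Prod.Lex.le_iff] using hle
  by_cases h1 : "d2d4" ∈ l
  · have hmz : m = "d2d4" := by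
      rcases hmin _ h1 with h | ⟨he, _⟩
      · rw [show pvBRank "d2d4" = 0 from rfl] at h
        have := pvBRank_nonneg m; omega
      · exact pvBRank_eq_zero m (by rw [show pvBRank "d2d4" = 0 from rfl] at he; exact he)
    simp [List.find?, h1, hmz]
  · by_cases h2 : "e2e4" ∈ l
    · have hmz : m = "e2e4" := by
        rcases hmin _ h2 with h | ⟨he, _⟩
        · rw [show pvBRank "e2e4" = 1 from rfl] at h
          have h0 := pvBRank_nonneg m
          have hz : pvBRank m = 0 := by omega
          exact absurd (pvBRank_eq_zero m hz ▸ hmem) h1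
        · exact pvBRank_eq_one m (by rw [show pvBRank "e2e4" = 1 from rfl] at he; exact he)
      simp [List.find?, h1, h2, hmz]
    · by_cases h3 : "d7d5" ∈ l
      · have hmz : m = "d7d5" := by
          rcases hmin _ h3 with h | ⟨he, _⟩
          · rw [show pvBRank "d7d5" = 2 from rfl] at h
            have h0 := pvBRank_nonneg m
            have hz : pvBRank m = 0 ∨ pvBRank m = 1 := by omega
            rcases hz with hz | hz
            · exact absurd (pvBRank_eq_zero m hz ▸ hmem) h1
            · exact absurd (pvBRank_eq_one m hz ▸ hmem) h2
          · exact pvBRank_eq_two m (by rw [show pvBRank "d7d5" = 2 from rfl] at he; exact he)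
        simp [List.find?, h1, h2, h3, hmz]
      · by_cases h4 : "e7e5" ∈ l
        · have hmz : m = "e7e5" := by
            rcases hmin _ h4 with h | ⟨he, _⟩
            · rw [show pvBRank "e7e5" = 3 from rfl] at h
              have h0 := pvBRank_nonneg m
              have hz : pvBRank m = 0 ∨ pvBRank m = 1 ∨ pvBRank m = 2 := by omega
              rcases hz with hz | hz | hz
              · exact absurd (pvBRank_eq_zero m hz ▸ hmem) h1
              · exact absurd (pvBRank_eq_one m hz ▸ hmem) h2
              · exact absurd (pvBRank_eq_two m hz ▸ hmem) h3
            · exact pvBRank_eq_three m (by rw [show pvBRank "e7e5" = 3 from rfl] at he; exact he)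
          simp [List.find?, h1, h2, h3, h4, hmz]
        · -- no center move present: ranks are all 4, the running minimum is the plain min = sorted head
          obtain ⟨h0, hh0, hh0mem, hh0min⟩ := pvSorted_head_min l hl
          have rk4 : ∀ y ∈ l, pvBRank y = 4 := by
            intro y hy
            have e1 : y ≠ "d2d4" := fun hh => h1 (hh ▸ hy)
            have e2 : y ≠ "e2e4" := fun hh => h2 (hh ▸ hy)
            have e3 : y ≠ "d7d5" := fun hh => h3 (hh ▸ hy)
            have e4 : y ≠ "e7e5" := fun hh => h4 (hh ▸ hy)
            simp [pvBRank, e1, e2, e3, e4]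
          have hmz : m = h0 := by
            have hmh : m ≤ h0 := by
              rcases hmin _ hh0mem with h | ⟨_, hle⟩
              · rw [rk4 m hmem, rk4 h0 hh0mem] at h; omega
              · exact hle
            exact le_antisymm hmh (hh0min m hmem)
          simp [List.find?, h1, h2, h3, h4, hh0, hmz]

-- ===== VERDICT (by name: the statement is the Claim_ definition above) =====
theorem fallback_decision_spec : Claim_equal_fallback_decision := by
  intro state _
  show fallback_decision state = fallback_decision_alt state
  unfold fallback_decision fallback_decision_alt
  cases hl : PySem.Dict.getD (PySem.Dict.mk state) "allowed_moves" [] with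
  | nil => simp
  | cons a t =>
    simp only [ne_eq, reduceCtorEq, not_false_iff, if_true]
    exact pvBranch_eq a t
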